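-- pv_equiv track=rewrite | github.com/Ashiq-am/Path-of-Python | 3.Data Types/List/List Archives/Find the Longest Increasing Subsequence in Circular manner/Find the Longest Increasing Subsequence in Circular manner.py | LICS
-- ===== SOURCE A (Python) =====
-- def computeLIS(circBuff, start, end, n):
--     LIS = [0 for i in range(end)]
--
--     # Initialize LIS values
--     # for all indexes
--     for i in range(start, end):
--         LIS[i] = 1
--
--     # Compute optimized LIS values
--     # in bottom up manner
--     for i in range(start + 1, end):
--
--         # Set j on the basis of current
--         # window i.e. first element of
--         # the current window
--         for j in range(start, i):
--             if (circBuff[i] > circBuff[j] and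
--                     LIS[i] < LIS[j] + 1):
--                 LIS[i] = LIS[j] + 1
--
--     # Pick maximum of all LIS values
--     res = -100000
--     for i in range(start, end):
--         res = max(res, LIS[i])
--     return res
--
-- def LICS(arr, n):
--     # Make a copy of given
--     # array by appending same
--     # array elements to itself
--     circBuff = [0 for i in range(2 * n)]
--     for i in range(n):
--         circBuff[i] = arr[i]
--     for i in range(n, 2 * n):
--         circBuff[i] = arr[i - n]
--
--     # Perform LIS for each
--     # window of size n
--     res = -100000
--     for i in range(n):
--         res = max(computeLIS(circBuff, i,
--                              i + n, n), res)
--     return res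
-- ===== SOURCE B (Python) =====
-- from bisect import bisect_left
--
-- def LICS(arr, n):
--     # Patience-sorting LIS (strictly increasing) per circular window.
--     a = arr[:n]
--     best = -100000
--     for i in range(n):
--         window = a[i:] + a[:i]
--         tails = []
--         for x in window:
--             j = bisect_left(tails, x)
--             if j == len(tails):
--                 tails.append(x)
--             else:
--                 tails[j] = x
--         best = max(best, len(tails))
--     return best
-- ===== Notes on version B (the rewrite author's own statement) =====
-- stated objective: faster
-- what changed: Each window's longest-increasing-subsequence length is computed by patience sorting with binary search (tails array + bisect_left) instead of the quadratic DP over all earlier indices, dropping the per-window cost from O(n^2) to O(n log n).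
import Mathlib
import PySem

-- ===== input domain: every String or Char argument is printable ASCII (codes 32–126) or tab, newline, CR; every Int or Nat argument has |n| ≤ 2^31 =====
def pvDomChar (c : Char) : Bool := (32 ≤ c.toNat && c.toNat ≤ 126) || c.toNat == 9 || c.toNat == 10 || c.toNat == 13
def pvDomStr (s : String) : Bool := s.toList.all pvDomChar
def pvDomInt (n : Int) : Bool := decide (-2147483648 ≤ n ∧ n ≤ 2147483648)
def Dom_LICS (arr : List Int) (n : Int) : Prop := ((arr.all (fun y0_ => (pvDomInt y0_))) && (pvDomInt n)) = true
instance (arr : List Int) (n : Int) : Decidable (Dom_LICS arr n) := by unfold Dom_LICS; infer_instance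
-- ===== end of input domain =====

-- B replaces A's quadratic per-window DP by patience sorting with binary search
-- (objective: faster); the theorems below are about the return value.

-- ===== PORT A =====
-- Transliteration of A's helper computeLIS; all indices A uses are nonnegative and
-- in range whenever Pre_LICS holds, where pyGetD/pySetD are exact for Python.
def computeLIS (circBuff : List Int) (start : Int) (end_ : Int) (n : Int) : Int :=
  let LIS0 : List Int := (PySem.List.pyRange 0 end_ 1).map (fun _ => (0 : Int))
  let LIS1 : List Int := (PySem.List.pyRange start end_ 1).foldl
      (fun L i => PySem.List.pySetD L i 1) LIS0
  let LIS2 : List Int := (PySem.List.pyRange (start + 1) end_ 1).foldl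
      (fun L i =>
        (PySem.List.pyRange start i 1).foldl
          (fun L' j =>
            if PySem.List.pyGetD circBuff i 0 > PySem.List.pyGetD circBuff j 0 ∧
               PySem.List.pyGetD L' i 0 < PySem.List.pyGetD L' j 0 + 1
            then PySem.List.pySetD L' i (PySem.List.pyGetD L' j 0 + 1)
            else L') L) LIS1
  (PySem.List.pyRange start end_ 1).foldl
    (fun res i => max res (PySem.List.pyGetD LIS2 i 0)) (-100000)

def LICS (arr : List Int) (n : Int) : Int :=
  let c0 : List Int := (PySem.List.pyRange 0 (2 * n) 1).map (fun _ => (0 : Int))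
  let c1 : List Int := (PySem.List.pyRange 0 n 1).foldl
      (fun c i => PySem.List.pySetD c i (PySem.List.pyGetD arr i 0)) c0
  let c2 : List Int := (PySem.List.pyRange n (2 * n) 1).foldl
      (fun c i => PySem.List.pySetD c i (PySem.List.pyGetD arr (i - n) 0)) c1
  (PySem.List.pyRange 0 n 1).foldl
    (fun res i => max (computeLIS c2 i (i + n) n) res) (-100000)

-- ===== PORT B =====
-- Patience sorting: one pass per window maintaining the sorted `tails` list;
-- Python's bisect_left is PySem.List.bisectLeft.
def lisTailsStep (tails : List Int) (x : Int) : List Int :=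
  let j := PySem.List.bisectLeft tails x
  if j = tails.length then tails ++ [x] else tails.set j x

def lisLen (window : List Int) : Int :=
  ((window.foldl lisTailsStep []).length : Int)

def LICS_alt (arr : List Int) (n : Int) : Int :=
  let a := PySem.List.slice arr none (some n)
  (PySem.List.pyRange 0 n 1).foldl
    (fun best i =>
      max best (lisLen (PySem.List.slice a (some i) none ++ PySem.List.slice a none (some i))))
    (-100000)

-- ===== PRECONDITION & SPEC =====
-- A reads arr[0..n); for n > len(arr) Python raises IndexError, so exactly those
-- inputs are excluded (any n ≤ len(arr), including n ≤ 0, stays inside Pre_).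
def Pre_LICS (arr : List Int) (n : Int) : Prop := n ≤ (arr.length : Int)
instance (arr : List Int) (n : Int) : Decidable (Pre_LICS arr n) := by
  unfold Pre_LICS; infer_instance
def pvWitness_LICS : List Int × Int := ([1, 3, 2], 3)
def Spec_LICS (arr : List Int) (n : Int) (out : Int) : Prop := out = LICS_alt arr n
instance (arr : List Int) (n : Int) (out : Int) : Decidable (Spec_LICS arr n out) := by
  unfold Spec_LICS; infer_instance

-- ===== CLAIM (what is proved, stated in full; the proofs are below) =====
def Claim_equal_LICS : Prop := ∀ (arr : List Int) (n : Int),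
  Dom_LICS arr n → Pre_LICS arr n → Spec_LICS arr n (LICS arr n)

-- ===== LEMMAS AND PROOFS =====

-- Structural middle ground: the per-window DP of A, as a fold building (value, dp) pairs.
def dpv (ps : List (Int × Int)) (x : Int) : Int :=
  ps.foldl (fun m p => if x > p.1 ∧ m < p.2 + 1 then p.2 + 1 else m) 1

def dpPairs (s : List Int) : List (Int × Int) :=
  s.foldl (fun ps x => ps ++ [(x, dpv ps x)]) []

def mLt (ps : List (Int × Int)) (y : Int) : Int :=
  ps.foldl (fun m p => if p.1 < y then max m p.2 else m) 0

def maxdp (ps : List (Int × Int)) (a : Int) : Int :=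
  ps.foldl (fun r p => max r p.2) a

def tailsOf (s : List Int) : List Int := s.foldl lisTailsStep []

def cnt (t : List Int) (y : Int) : Int := (t.countP (fun z => decide (z < y)) : Int)

-- The patience-sorting invariant tying B's tails list to A's DP values.
def PatInv (ps : List (Int × Int)) (t : List Int) : Prop :=
  t.Pairwise (· < ·) ∧ (t.length : Int) = maxdp ps 0 ∧ ∀ y, cnt t y = mLt ps y

theorem dpPairs_append (s : List Int) (x : Int) :
    dpPairs (s ++ [x]) = dpPairs s ++ [(x, dpv (dpPairs s) x)] := by
  simp [dpPairs]

theorem tailsOf_append (s : List Int) (x : Int) :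
    tailsOf (s ++ [x]) = lisTailsStep (tailsOf s) x := by
  simp [tailsOf]

theorem map_fst_dpPairs (s : List Int) : (dpPairs s).map Prod.fst = s := by
  induction s using List.reverseRecOn with
  | nil => rfl
  | append_singleton s x ih => simp [dpPairs_append, ih]

theorem length_dpPairs (s : List Int) : (dpPairs s).length = s.length := by
  have h := congrArg List.length (map_fst_dpPairs s)
  simpa using h

theorem mLt_append (ps : List (Int × Int)) (p : Int × Int) (y : Int) :
    mLt (ps ++ [p]) y = if p.1 < y then max (mLt ps y) p.2 else mLt ps y := by
  simp [mLt]

theorem maxdp_append (ps : List (Int × Int)) (p : Int × Int) (a : Int) :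
    maxdp (ps ++ [p]) a = max (maxdp ps a) p.2 := by
  simp [maxdp]

theorem mLt_nonneg_aux (l : List (Int × Int)) (y : Int) : ∀ b : Int,
    b ≤ l.foldl (fun m p => if p.1 < y then max m p.2 else m) b := by
  induction l with
  | nil => intro b; simp
  | cons p l ih =>
    intro b
    simp only [List.foldl_cons]
    refine le_trans ?_ (ih _)
    split <;> simp [le_max_left]

theorem mLt_nonneg (ps : List (Int × Int)) (y : Int) : 0 ≤ mLt ps y :=
  mLt_nonneg_aux ps y 0

theorem dpv_eq_mLt_aux (x : Int) (l : List (Int × Int)) : ∀ b : Int,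
    l.foldl (fun m p => if x > p.1 ∧ m < p.2 + 1 then p.2 + 1 else m) (b + 1)
      = l.foldl (fun m p => if p.1 < x then max m p.2 else m) b + 1 := by
  induction l with
  | nil => intro b; simp
  | cons p l ih =>
    intro b
    simp only [List.foldl_cons]
    have hstep : (if x > p.1 ∧ b + 1 < p.2 + 1 then p.2 + 1 else b + 1)
        = (if p.1 < x then max b p.2 else b) + 1 := by
      simp only [max_def]
      split_ifs <;> omega
    rw [hstep]
    exact ih _

theorem dpv_eq_mLt (ps : List (Int × Int)) (x : Int) : dpv ps x = mLt ps x + 1 := by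
  have h := dpv_eq_mLt_aux x ps 0
  simpa [dpv, mLt] using h

theorem countP_eq_of_split (t : List Int) (p : Int → Bool) :
    ∀ (j : Nat), j ≤ t.length →
    (∀ i (h : i < t.length), i < j → p t[i]) →
    (∀ i (h : i < t.length), j ≤ i → ¬ (p t[i] = true)) → t.countP p = j := by
  induction t with
  | nil =>
    intro j hj _ _
    simp at hj
    simpa using hj.symm
  | cons a t ih =>
    intro j hj h1 h2
    cases j with
    | zero =>
      have ha : ¬ (p a = true) := by simpa using h2 0 (by simp) (by omega)
      have ht : t.countP p = 0 := by
        rw [List.countP_eq_zero]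
        intro b hb
        obtain ⟨i, hi, hbe⟩ := List.mem_iff_getElem.mp hb
        subst hbe
        have := h2 (i + 1) (by simpa using Nat.succ_lt_succ hi) (by omega)
        simpa using this
      simp [List.countP_cons, ha, ht]
    | succ j =>
      have ha : p a = true := by simpa using h1 0 (by simp) (by omega)
      have ht : t.countP p = j := by
        apply ih j (by simpa using Nat.lt_succ_iff.mp (Nat.lt_succ_of_le hj))
        · intro i hi hij
          have := h1 (i + 1) (by simpa using Nat.succ_lt_succ hi) (by omega)
          simpa using this
        · intro i hi hij
          have := h2 (i + 1) (by simpa using Nat.succ_lt_succ hi) (by omega)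
          simpa using this
      simp [List.countP_cons, ha, ht]

theorem inv_step (ps : List (Int × Int)) (t : List Int) (x : Int) (h : PatInv ps t) :
    PatInv (ps ++ [(x, dpv ps x)]) (lisTailsStep t x) := by
  obtain ⟨hsort, hlen, hcnt⟩ := h
  have hle : t.Pairwise (· ≤ ·) := hsort.imp (fun h => le_of_lt h)
  obtain ⟨hjle, hlt, hge⟩ := PySem.List.bisectLeft_spec t x hle
  set j := PySem.List.bisectLeft t x with hjdef
  have hcount : t.countP (fun z => decide (z < x)) = j :=
    countP_eq_of_split t _ j hjle
      (fun i hi hij => by simp [hlt i hi hij])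
      (fun i hi hij => by simp [not_lt.mpr (hge i hi hij)])
  have hjx : (j : Int) = mLt ps x := by
    have h := hcnt x
    rw [cnt, hcount] at h
    exact h
  have hdpv : dpv ps x = (j : Int) + 1 := by rw [dpv_eq_mLt, ← hjx]
  by_cases hjlen : j = t.length
  · -- bisect_left fell off the end: append x
    have hstep : lisTailsStep t x = t ++ [x] := by
      simp [lisTailsStep, ← hjdef, hjlen]
    have hall : ∀ z ∈ t, z < x := by
      intro z hz
      obtain ⟨i, hi, hbe⟩ := List.mem_iff_getElem.mp hz
      subst hbe
      exact hlt i hi (by omega)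
    rw [hstep]
    refine ⟨?_, ?_, ?_⟩
    · rw [List.pairwise_append]
      refine ⟨hsort, by simp, ?_⟩
      intro a ha b hb
      simp only [List.mem_singleton] at hb
      subst hb
      exact hall a ha
    · rw [maxdp_append, ← hlen, hdpv, hjlen]
      rw [max_eq_right (by omega)]
      simp
    · intro y
      rw [mLt_append]
      simp only
      by_cases hxy : x < y
      · rw [if_pos hxy]
        have hcnty : cnt (t ++ [x]) y = cnt t y + 1 := by
          simp [cnt, List.countP_append, hxy]
        have hall_y : cnt t y = (j : Int) := by
          have h : t.countP (fun z => decide (z < y)) = t.length :=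
            countP_eq_of_split t _ t.length le_rfl
              (fun i hi _ => by
                simp only [decide_eq_true_eq]
                exact lt_trans (hall _ (List.getElem_mem hi)) hxy)
              (fun i hi hij => by omega)
          rw [cnt, h, hjlen]
        have hmlt : mLt ps y = (j : Int) := by rw [← hcnt y, hall_y]
        rw [hcnty, hall_y, hmlt, hdpv, max_eq_right (by omega)]
      · rw [if_neg hxy]
        have h : cnt (t ++ [x]) y = cnt t y := by
          simp [cnt, List.countP_append, hxy]
        rw [h, hcnt y]
  · -- replace t[j] by x
    have hjlt : j < t.length := lt_of_le_of_ne hjle hjlen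
    have hstep : lisTailsStep t x = t.take j ++ x :: t.drop (j + 1) := by
      simp only [lisTailsStep, ← hjdef]
      rw [if_neg hjlen]
      exact List.set_eq_take_cons_drop x hjlt
    have hxj : x ≤ t[j] := hge j hjlt le_rfl
    have htake_lt : ∀ z ∈ t.take j, z < x := by
      intro z hz
      obtain ⟨i, hi, hbe⟩ := List.mem_iff_getElem.mp hz
      subst hbe
      have hij : i < j := by
        have h := hi
        simp only [List.length_take] at h
        omega
      rw [List.getElem_take]
      exact hlt i (by omega) hij
    have hdrop_tj : ∀ z ∈ t.drop (j + 1), t[j] < z := by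
      intro z hz
      obtain ⟨i, hi, hbe⟩ := List.mem_iff_getElem.mp hz
      subst hbe
      have hlen' : j + 1 + i < t.length := by
        have h := hi
        simp only [List.length_drop] at h
        omega
      rw [List.getElem_drop]
      exact List.pairwise_iff_getElem.mp hsort j (j + 1 + i) hjlt hlen' (by omega)
    have hdrop_gt : ∀ z ∈ t.drop (j + 1), x < z := fun z hz =>
      lt_of_le_of_lt hxj (hdrop_tj z hz)
    rw [hstep]
    refine ⟨?_, ?_, ?_⟩
    · rw [List.pairwise_append]
      refine ⟨hsort.sublist (List.take_sublist _ _), ?_, ?_⟩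
      · rw [List.pairwise_cons]
        exact ⟨hdrop_gt, hsort.sublist (List.drop_sublist _ _)⟩
      · intro a ha b hb
        rcases List.mem_cons.mp hb with hb | hb
        · subst hb; exact htake_lt a ha
        · exact lt_trans (htake_lt a ha) (hdrop_gt b hb)
    · rw [maxdp_append, ← hlen, hdpv, max_eq_left (by omega)]
      simp only [List.length_append, List.length_take, List.length_cons, List.length_drop]
      congr 1
      omega
    · intro y
      rw [mLt_append]
      simp only
      have hctj_lt : ∀ z ∈ t.take j, z < x := htake_lt
      set ct := (t.take j).countP (fun z => decide (z < y)) with hct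
      set cd := (t.drop (j + 1)).countP (fun z => decide (z < y)) with hcd
      have htsplit : t = t.take j ++ t[j] :: t.drop (j + 1) := by
        conv_lhs => rw [← List.take_append_drop j t]
        rw [List.getElem_cons_drop hjlt]
      have e2 : cnt t y = (ct : Int) + (if t[j] < y then 1 else 0) + cd := by
        rw [cnt]
        conv_lhs => rw [htsplit]
        rw [List.countP_append, List.countP_cons]
        by_cases h : t[j] < y <;> simp [h, ← hct, ← hcd] <;> push_cast <;> ring
      have e1 : cnt (t.take j ++ x :: t.drop (j + 1)) y
          = (ct : Int) + (if x < y then 1 else 0) + cd := by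
        rw [cnt, List.countP_append, List.countP_cons]
        by_cases h : x < y <;> simp [h, ← hct, ← hcd] <;> push_cast <;> ring
      have hmy := hcnt y
      by_cases hxy : x < y
      · rw [if_pos hxy, hdpv]
        have hctj : ct = j := by
          rw [hct]
          apply countP_eq_of_split
          · simp [List.length_take]; omega
          · intro i hi hij
            simp only [List.getElem_take, decide_eq_true_eq]
            have hij' : i < j := by simp only [List.length_take] at hi; omega
            exact lt_trans (hlt i (by omega) hij') hxy
          · intro i hi hij
            exfalso
            simp only [List.length_take] at hi
            omega
        by_cases hty : t[j] < y
        · have hge' : (j : Int) + 1 ≤ mLt ps y := by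
            rw [← hmy, e2, hctj, if_pos hty]
            omega
          rw [e1, if_pos hxy, max_eq_left hge', ← hmy, e2, if_pos hty, hctj]
        · have hyle : y ≤ t[j] := not_lt.mp hty
          have hcd0 : cd = 0 := by
            rw [hcd, List.countP_eq_zero]
            intro z hz
            have := hdrop_tj z hz
            simp only [decide_eq_true_eq]
            omega
          have hmyj : mLt ps y = (j : Int) := by
            rw [← hmy, e2, hctj, if_neg hty, hcd0]
            push_cast
            ring
          rw [e1, if_pos hxy, hctj, hcd0, hmyj, max_eq_right (by omega)]
          push_cast
          ring
      · rw [if_neg hxy]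
        have hty : ¬ t[j] < y := by omega
        rw [e1, if_neg hxy, ← hmy, e2, if_neg hty]

theorem inv_all (s : List Int) : PatInv (dpPairs s) (tailsOf s) := by
  induction s using List.reverseRecOn with
  | nil =>
    refine ⟨List.Pairwise.nil, by simp [maxdp, dpPairs, tailsOf], fun y => by
      simp [cnt, mLt, dpPairs, tailsOf]⟩
  | append_singleton s x ih =>
    rw [dpPairs_append, tailsOf_append]
    exact inv_step _ _ _ ih

theorem snd_dpPairs_ge_one (s : List Int) : ∀ p ∈ dpPairs s, 1 ≤ p.2 := by
  induction s using List.reverseRecOn with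
  | nil => simp [dpPairs]
  | append_singleton s x ih =>
    rw [dpPairs_append]
    intro p hp
    rcases List.mem_append.mp hp with h | h
    · exact ih p h
    · have hp' : p = (x, dpv (dpPairs s) x) := by simpa using h
      subst hp'
      have := mLt_nonneg (dpPairs s) x
      rw [dpv_eq_mLt]
      omega

theorem maxdp_init_swap (ps : List (Int × Int)) (hne : ps ≠ [])
    (h1 : ∀ p ∈ ps, 1 ≤ p.2) (a b : Int) (ha : a ≤ 1) (hb : b ≤ 1) :
    maxdp ps a = maxdp ps b := by
  cases ps with
  | nil => exact absurd rfl hne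
  | cons p l =>
    have hp : 1 ≤ p.2 := h1 p (by simp)
    simp only [maxdp, List.foldl_cons]
    rw [max_eq_right (le_trans ha hp), max_eq_right (le_trans hb hp)]

theorem window_eq (w : List Int) (hw : w ≠ []) :
    maxdp (dpPairs w) (-100000) = lisLen w := by
  have hne : dpPairs w ≠ [] := by
    intro h
    have hl := length_dpPairs w
    rw [h] at hl
    exact hw (List.length_eq_zero_iff.mp hl.symm)
  have h1 := snd_dpPairs_ge_one w
  have hinv := inv_all w
  have h : maxdp (dpPairs w) (-100000) = maxdp (dpPairs w) 0 :=
    maxdp_init_swap _ hne h1 _ _ (by norm_num) (by norm_num)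
  rw [h, ← hinv.2.1]
  rfl

-- ===== Bridging the ports to the structural versions =====

theorem pyGetD_pySetD_self (L : List Int) (iI : Int) (hi0 : 0 ≤ iI)
    (hiL : iI.toNat < L.length) (v : Int) :
    PySem.List.pyGetD (PySem.List.pySetD L iI v) iI 0 = v := by
  rw [PySem.List.pySetD_of_nonneg L v hi0, PySem.List.pyGetD_of_nonneg _ _ hi0,
    List.getD_eq_getElem _ _ (by simpa using hiL)]
  exact List.getElem_set_self (by simpa using hiL)

theorem pyGetD_pySetD_ne (L : List Int) (iI jJ : Int) (hi0 : 0 ≤ iI) (hj0 : 0 ≤ jJ)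
    (hne : jJ ≠ iI) (v : Int) :
    PySem.List.pyGetD (PySem.List.pySetD L iI v) jJ 0 = PySem.List.pyGetD L jJ 0 := by
  rw [PySem.List.pySetD_of_nonneg L v hi0, PySem.List.pyGetD_of_nonneg _ _ hj0,
    PySem.List.pyGetD_of_nonneg _ _ hj0, List.getD_eq_getElem?_getD, List.getD_eq_getElem?_getD,
    List.getElem?_set_ne (by omega)]

theorem pySetD_pySetD (L : List Int) (iI : Int) (hi0 : 0 ≤ iI) (v w : Int) :
    PySem.List.pySetD (PySem.List.pySetD L iI v) iI w = PySem.List.pySetD L iI w := by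
  rw [PySem.List.pySetD_of_nonneg L v hi0, PySem.List.pySetD_of_nonneg _ _ hi0,
    PySem.List.pySetD_of_nonneg L w hi0, List.set_set]

theorem pySetD_self (L : List Int) (iI : Int) (hi0 : 0 ≤ iI) (hiL : iI.toNat < L.length) :
    PySem.List.pySetD L iI (PySem.List.pyGetD L iI 0) = L := by
  rw [PySem.List.pySetD_of_nonneg L _ hi0, PySem.List.pyGetD_of_nonneg _ _ hi0,
    List.getD_eq_getElem _ _ hiL]
  exact List.set_getElem_self hiL

theorem fill (f : Int → Int) (j k : Nat) (cs : List Int) (h : j + k ≤ cs.length) :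
    (PySem.List.pyRange (j : Int) ((j : Int) + (k : Int)) 1).foldl
        (fun L i => PySem.List.pySetD L i (f i)) cs
      = cs.take j ++ (List.range k).map (fun t : Nat => f ((j : Int) + (t : Int)))
          ++ cs.drop (j + k) := by
  induction k with
  | zero =>
    simp only [Nat.cast_zero, add_zero, Nat.add_zero, List.range_zero, List.map_nil,
      List.append_nil]
    rw [PySem.List.pyRange_one_eq_nil le_rfl]
    simp [List.take_append_drop]
  | succ k ih =>
    have hk : j + k ≤ cs.length := by omega
    have hcast : ((j : Int) + ((k + 1 : Nat) : Int)) = ((j : Int) + (k : Int)) + 1 := by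
      push_cast; ring
    rw [hcast, PySem.List.pyRange_one_succ_right (by omega), List.foldl_append, ih hk]
    simp only [List.foldl_cons, List.foldl_nil]
    have hidx : ((j : Int) + (k : Int)) = (((j + k : Nat)) : Int) := by push_cast; ring
    rw [hidx, PySem.List.pySetD_natCast]
    have hlen1 : (cs.take j).length = j := by simp [List.length_take]; omega
    have hlen2 : ((List.range k).map (fun t : Nat => f ((j : Int) + (t : Int)))).length = k := by
      simp
    rw [List.set_append, if_neg (by simp [hlen1, hlen2])]
    have hsub : j + k - (cs.take j ++ (List.range k).map
        (fun t : Nat => f ((j : Int) + (t : Int)))).length = 0 := by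
      simp [hlen1, hlen2]
    rw [hsub]
    have hdrop : cs.drop (j + k) = cs[j + k]'(by omega) :: cs.drop (j + k + 1) :=
      (List.getElem_cons_drop (by omega)).symm
    rw [hdrop, List.set_cons_zero, List.range_succ, List.map_append]
    simp only [List.map_cons, List.map_nil, List.append_assoc, List.cons_append,
      List.nil_append]
    rw [← hidx, show j + (k + 1) = j + k + 1 from by omega]

theorem mapRange_getD_take (xs : List Int) (m : Nat) (hm : m ≤ xs.length) :
    (List.range m).map (fun t => xs.getD t 0) = xs.take m := by
  apply List.ext_getElem
  · simp
    omega
  · intro i h1 h2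
    have him : i < m := by simpa using h1
    rw [List.getElem_map, List.getElem_range, List.getElem_take,
      List.getD_eq_getElem _ _ (by omega)]

theorem innerFold (cs : List Int) (iI : Int) (hi0 : 0 ≤ iI) :
    ∀ (js : List Int), (∀ j ∈ js, 0 ≤ j ∧ j ≠ iI) →
    ∀ (L : List Int), iI.toNat < L.length →
    js.foldl (fun L' j =>
        if PySem.List.pyGetD cs iI 0 > PySem.List.pyGetD cs j 0 ∧
           PySem.List.pyGetD L' iI 0 < PySem.List.pyGetD L' j 0 + 1
        then PySem.List.pySetD L' iI (PySem.List.pyGetD L' j 0 + 1) else L') L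
    = PySem.List.pySetD L iI
        (js.foldl (fun m j =>
           if PySem.List.pyGetD cs iI 0 > PySem.List.pyGetD cs j 0 ∧ m < PySem.List.pyGetD L j 0 + 1
           then PySem.List.pyGetD L j 0 + 1 else m) (PySem.List.pyGetD L iI 0)) := by
  intro js
  induction js with
  | nil =>
    intro _ L hiL
    simp only [List.foldl_nil]
    exact (pySetD_self L iI hi0 hiL).symm
  | cons j js ih =>
    intro hmem L hiL
    obtain ⟨hj0, hjne⟩ := hmem j (by simp)
    have hmem' : ∀ j' ∈ js, 0 ≤ j' ∧ j' ≠ iI := fun j' h => hmem j' (by simp [h])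
    simp only [List.foldl_cons]
    by_cases hc : PySem.List.pyGetD cs iI 0 > PySem.List.pyGetD cs j 0 ∧
        PySem.List.pyGetD L iI 0 < PySem.List.pyGetD L j 0 + 1
    · rw [if_pos hc, if_pos hc]
      set v := PySem.List.pyGetD L j 0 + 1 with hv
      have hlen' : iI.toNat < (PySem.List.pySetD L iI v).length := by
        rw [PySem.List.length_pySetD]; exact hiL
      rw [ih hmem' _ hlen', pySetD_pySetD L iI hi0]
      congr 1
      have hinit : PySem.List.pyGetD (PySem.List.pySetD L iI v) iI 0 = v :=
        pyGetD_pySetD_self L iI hi0 hiL v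
      rw [hinit]
      apply PySem.List.foldl_congr_mem
      intro acc j' hj'
      obtain ⟨hj'0, hj'ne⟩ := hmem' j' hj'
      rw [pyGetD_pySetD_ne L iI j' hi0 hj'0 hj'ne]
    · rw [if_neg hc, if_neg hc]
      exact ih hmem' L hiL

theorem dpPairs_getD_fst (v : List Int) (u : Nat) :
    ((dpPairs v).getD u ((0 : Int), (0 : Int))).1 = v.getD u 0 := by
  rw [List.getD_eq_getElem?_getD, List.getD_eq_getElem?_getD]
  have h := congrArg (fun l => l[u]?) (map_fst_dpPairs v)
  simp only [List.getElem?_map] at h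
  rw [← h]
  cases hx : (dpPairs v)[u]? with
  | none => simp
  | some p => simp

theorem rotate_window (a : List Int) (i m : Nat) (hi : i ≤ a.length) (hm : a.length = m) :
    ((a ++ a).drop i).take m = a.drop i ++ a.take i := by
  rw [List.drop_append_of_le_length hi, List.take_append]
  have h1 : (a.drop i).take m = a.drop i :=
    List.take_of_length_le (by simp [List.length_drop]; omega)
  have h2 : m - (a.drop i).length = i := by simp [List.length_drop]; omega
  rw [h1, h2]

theorem window_getElem (cs : List Int) (s m u : Nat) (hu : u < m) (hsm : s + m ≤ cs.length) :
    ((cs.drop s).take m)[u]'(by simp [List.length_take, List.length_drop]; omega)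
      = cs[s + u]'(by omega) := by
  rw [List.getElem_take, List.getElem_drop]

theorem window_getD (cs : List Int) (s m u : Nat) (hu : u < m) (hsm : s + m ≤ cs.length) :
    ((cs.drop s).take m).getD u 0 = cs.getD (s + u) 0 := by
  rw [List.getD_eq_getElem _ _ (by simp [List.length_take, List.length_drop]; omega),
    List.getD_eq_getElem _ _ (by omega : s + u < cs.length)]
  exact window_getElem cs s m u hu hsm

theorem map_snd_getD (ps : List (Int × Int)) (u : Nat) (hu : u < ps.length) :
    (ps.map Prod.snd).getD u 0 = (ps.getD u ((0 : Int), (0 : Int))).2 := by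
  rw [List.getD_eq_getElem _ _ (by simpa using hu), List.getD_eq_getElem _ _ hu,
    List.getElem_map]

theorem take_getD_eq (l : List Int) (k u : Nat) (hu : u < k) (hk : u < l.length) :
    (l.take k).getD u 0 = l.getD u 0 := by
  rw [List.getD_eq_getElem _ _ (by simp [List.length_take]; omega),
    List.getD_eq_getElem _ _ hk]
  exact List.getElem_take

-- one outer iteration of A's DP loop, in structural form
theorem outerFold (cs : List Int) (s m : Nat) (hsm : s + m ≤ cs.length) (hm : 0 < m) :
    ∀ (q : Nat), q + 1 ≤ m →
    (PySem.List.pyRange ((s : Int) + 1) ((s : Int) + 1 + (q : Int)) 1).foldl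
        (fun L i =>
          (PySem.List.pyRange (s : Int) i 1).foldl
            (fun L' j =>
              if PySem.List.pyGetD cs i 0 > PySem.List.pyGetD cs j 0 ∧
                 PySem.List.pyGetD L' i 0 < PySem.List.pyGetD L' j 0 + 1
              then PySem.List.pySetD L' i (PySem.List.pyGetD L' j 0 + 1) else L') L)
        (List.replicate s 0 ++ List.replicate m 1)
    = List.replicate s (0 : Int)
        ++ (dpPairs (((cs.drop s).take m).take (q + 1))).map Prod.snd
        ++ List.replicate (m - (q + 1)) 1 := by
  intro q
  induction q with
  | zero =>
    intro _
    simp only [Nat.cast_zero, add_zero]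
    rw [PySem.List.pyRange_one_eq_nil le_rfl]
    simp only [List.foldl_nil]
    obtain ⟨m', rfl⟩ : ∃ m', m = m' + 1 := ⟨m - 1, by omega⟩
    rcases hwc : (cs.drop s).take (m' + 1) with _ | ⟨w0, wr⟩
    · exfalso
      have h := congrArg List.length hwc
      simp [List.length_take, List.length_drop] at h
      omega
    · have ht1 : (w0 :: wr).take 1 = [w0] := by simp
      have hdp : dpPairs [w0] = [(w0, 1)] := rfl
      rw [ht1, hdp]
      simp [List.replicate_succ]
  | succ q ihq =>
    intro hq
    have ih := ihq (by omega)
    have hcast : ((s : Int) + 1 + ((q + 1 : Nat) : Int)) = ((s : Int) + 1 + (q : Int)) + 1 := by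
      push_cast; ring
    rw [hcast, PySem.List.pyRange_one_succ_right (by omega), List.foldl_append, ih]
    simp only [List.foldl_cons, List.foldl_nil]
    set w := (cs.drop s).take m with hwdef
    have hwlen : w.length = m := by
      simp [hwdef, List.length_take, List.length_drop]; omega
    set ps := dpPairs (w.take (q + 1)) with hpsdef
    have hpslen : ps.length = q + 1 := by
      rw [hpsdef, length_dpPairs]
      simp [List.length_take]; omega
    have hLlen : (List.replicate s (0 : Int) ++ ps.map Prod.snd
        ++ List.replicate (m - (q + 1)) 1).length = s + m := by
      simp [hpslen]; omega
    have hi : ((s : Int) + 1 + (q : Int)) = (((s + q + 1 : Nat)) : Int) := by push_cast; ring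
    rw [hi]
    set L := List.replicate s (0 : Int) ++ ps.map Prod.snd
        ++ List.replicate (m - (q + 1)) 1 with hLdef
    have hinner := innerFold cs ((s + q + 1 : Nat) : Int) (by positivity)
      (PySem.List.pyRange (s : Int) ((s + q + 1 : Nat) : Int) 1)
      (by
        intro j hj
        obtain ⟨h1, h2⟩ := PySem.List.mem_pyRange_one.mp hj
        constructor
        · omega
        · omega)
      L (by simp only [Int.toNat_natCast, hLlen]; omega)
    rw [hinner]
    -- evaluate the reads of L and cs inside the value fold
    set d0 : Int × Int := ((0 : Int), (0 : Int)) with hd0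
    set P := List.replicate s d0 ++ ps with hPdef
    have hPlen : P.length = s + q + 1 := by simp [hPdef, hpslen]; omega
    have hinit : PySem.List.pyGetD L ((s + q + 1 : Nat) : Int) 0 = 1 := by
      rw [PySem.List.pyGetD_natCast, hLdef]
      rw [List.getD_append_right _ _ _ _ (by simp [hpslen]; omega)]
      obtain ⟨r, hr⟩ : ∃ r, m - (q + 1) = r + 1 := ⟨m - (q + 2), by omega⟩
      simp [hpslen, hr, List.replicate_succ]
    have hreadc : ∀ j ∈ PySem.List.pyRange (s : Int) ((s + q + 1 : Nat) : Int) 1,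
        PySem.List.pyGetD cs j 0 = (PySem.List.pyGetD P j d0).1 := by
      intro j hj
      obtain ⟨hj1, hj2⟩ := PySem.List.mem_pyRange_one.mp hj
      obtain ⟨u, rfl⟩ : ∃ u : Nat, j = ((s + u : Nat) : Int) := ⟨(j - s).toNat, by omega⟩
      have hu : u < q + 1 := by omega
      rw [PySem.List.pyGetD_natCast, PySem.List.pyGetD_natCast, hPdef]
      rw [List.getD_append_right _ _ _ _ (by simp)]
      simp only [List.length_replicate, Nat.add_sub_cancel_left]
      rw [hpsdef, dpPairs_getD_fst]
      rw [take_getD_eq]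
      · exact (window_getD cs s m u (by omega) hsm).symm
      · exact hu
      · omega
    have hreadL : ∀ j ∈ PySem.List.pyRange (s : Int) ((s + q + 1 : Nat) : Int) 1,
        PySem.List.pyGetD L j 0 = (PySem.List.pyGetD P j d0).2 := by
      intro j hj
      obtain ⟨hj1, hj2⟩ := PySem.List.mem_pyRange_one.mp hj
      obtain ⟨u, rfl⟩ : ∃ u : Nat, j = ((s + u : Nat) : Int) := ⟨(j - s).toNat, by omega⟩
      have hu : u < q + 1 := by omega
      rw [PySem.List.pyGetD_natCast, PySem.List.pyGetD_natCast, hPdef, hLdef]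
      rw [List.getD_append _ _ _ _ (by simp [hpslen]; omega)]
      rw [List.getD_append_right _ _ _ _ (by simp), List.getD_append_right _ _ _ _ (by simp)]
      simp only [List.length_replicate, Nat.add_sub_cancel_left]
      exact map_snd_getD ps u (by omega)
    have hcong := PySem.List.foldl_congr_mem
      (PySem.List.pyRange (s : Int) ((s + q + 1 : Nat) : Int) 1)
      (fun m' j =>
        if PySem.List.pyGetD cs ((s + q + 1 : Nat) : Int) 0 > PySem.List.pyGetD cs j 0 ∧
           m' < PySem.List.pyGetD L j 0 + 1
        then PySem.List.pyGetD L j 0 + 1 else m')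
      (fun m' j =>
        if PySem.List.pyGetD cs ((s + q + 1 : Nat) : Int) 0 > (PySem.List.pyGetD P j d0).1 ∧
           m' < (PySem.List.pyGetD P j d0).2 + 1
        then (PySem.List.pyGetD P j d0).2 + 1 else m')
      (PySem.List.pyGetD L ((s + q + 1 : Nat) : Int) 0)
      (by
        intro acc j hj
        dsimp only
        rw [hreadc j hj, hreadL j hj])
    rw [hcong, hinit]
    set xv := PySem.List.pyGetD cs ((s + q + 1 : Nat) : Int) 0 with hxv
    have hup : ((s + q + 1 : Nat) : Int) = (P.length : Int) := by rw [hPlen]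
    rw [hup, PySem.List.foldl_pyRange_pyGetD' P d0
      (fun m' p => if xv > p.1 ∧ m' < p.2 + 1 then p.2 + 1 else m') 1 (Int.natCast_nonneg s)]
    have hPdrop : P.drop ((s : Int)).toNat = ps := by
      simp only [Int.toNat_natCast, hPdef]
      simpa using List.drop_left (List.replicate s d0) ps
    rw [hPdrop, ← hup]
    have hxveq : xv = w.getD (q + 1) 0 := by
      rw [hxv, PySem.List.pyGetD_natCast, hwdef, window_getD cs s m (q + 1) (by omega) hsm]
      simp [Nat.add_assoc]
    have hfold : ps.foldl
        (fun m' p => if xv > p.1 ∧ m' < p.2 + 1 then p.2 + 1 else m') 1 = dpv ps xv := rfl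
    rw [hfold]
    -- perform the write
    rw [PySem.List.pySetD_natCast, hLdef]
    rw [List.set_append, if_neg (by simp [hpslen]; omega)]
    have hsub : s + q + 1 - (List.replicate s (0 : Int) ++ ps.map Prod.snd).length = 0 := by
      simp [hpslen]
    rw [hsub]
    obtain ⟨r, hr⟩ : ∃ r, m - (q + 1) = r + 1 := ⟨m - (q + 2), by omega⟩
    rw [hr, List.replicate_succ, List.set_cons_zero]
    have htk : w.take (q + 1 + 1) = w.take (q + 1) ++ [w[q + 1]'(by omega)] := by
      rw [List.take_add_one]
      simp [List.getElem?_eq_getElem (show q + 1 < w.length from by omega)]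
    rw [htk, dpPairs_append, List.map_append, ← hpsdef]
    have hgd : w.getD (q + 1) 0 = w[q + 1]'(by omega) :=
      List.getD_eq_getElem _ _ (by omega)
    rw [← hgd, ← hxveq]
    have hrep : m - (q + 1 + 1) = r := by omega
    rw [hrep]
    simp [List.append_assoc]

theorem computeLIS_eq (cs : List Int) (s m : Nat) (nn : Int) (hm : 0 < m)
    (hsm : s + m ≤ cs.length) :
    computeLIS cs (s : Int) ((s : Int) + (m : Int)) nn
      = maxdp (dpPairs ((cs.drop s).take m)) (-100000) := by
  have hwlen : ((cs.drop s).take m).length = m := by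
    simp [List.length_take, List.length_drop]; omega
  simp only [computeLIS]
  have h0 : (PySem.List.pyRange 0 ((s : Int) + (m : Int)) 1).map (fun _ => (0 : Int))
      = List.replicate (s + m) (0 : Int) := by
    have he : ((s : Int) + (m : Int) - 0).toNat = s + m := by omega
    rw [List.map_const', PySem.List.length_pyRange_one, he]
  rw [h0]
  have h1 : (PySem.List.pyRange (s : Int) ((s : Int) + (m : Int)) 1).foldl
      (fun L i => PySem.List.pySetD L i 1) (List.replicate (s + m) 0)
      = List.replicate s (0 : Int) ++ List.replicate m (1 : Int) := by
    rw [fill (fun _ => (1 : Int)) s m (List.replicate (s + m) 0) (by simp)]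
    rw [List.take_replicate, List.drop_replicate, Nat.min_eq_left (by omega : s ≤ s + m)]
    simp [List.map_const']
  rw [h1]
  have h2 := outerFold cs s m hsm hm (m - 1) (by omega)
  have hb : ((s : Int) + 1 + ((m - 1 : Nat) : Int)) = (s : Int) + (m : Int) := by omega
  rw [hb] at h2
  have hmq : m - 1 + 1 = m := by omega
  rw [hmq] at h2
  rw [List.take_of_length_le (le_of_eq hwlen)] at h2
  rw [h2]
  simp only [Nat.sub_self, List.replicate_zero, List.append_nil]
  have hLflen : ((s : Int) + (m : Int))
      = (((List.replicate s (0 : Int)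
          ++ (dpPairs ((cs.drop s).take m)).map Prod.snd).length : Nat) : Int) := by
    simp [length_dpPairs, hwlen]
  rw [hLflen, PySem.List.foldl_pyRange_pyGetD' _ 0 (fun res v => max res v) (-100000)
    (Int.natCast_nonneg s)]
  have hdrop : (List.replicate s (0 : Int)
      ++ (dpPairs ((cs.drop s).take m)).map Prod.snd).drop ((s : Int)).toNat
      = (dpPairs ((cs.drop s).take m)).map Prod.snd := by
    simp only [Int.toNat_natCast]
    simpa using List.drop_left (List.replicate s (0 : Int))
      ((dpPairs ((cs.drop s).take m)).map Prod.snd)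
  rw [hdrop, List.foldl_map]
  rfl

-- ===== VERDICT (by name: the statement is the Claim_ definition above) =====
theorem LICS_spec : Claim_equal_LICS := by
  intro arr n _hdom hpre
  unfold Spec_LICS
  by_cases hn : n ≤ 0
  · simp only [LICS, LICS_alt]
    simp [PySem.List.pyRange_one_eq_nil hn]
  · push_neg at hn
    obtain ⟨m, rfl⟩ : ∃ m : Nat, n = (m : Int) := ⟨n.toNat, by omega⟩
    have hm : 0 < m := by exact_mod_cast hn
    have hmlen : m ≤ arr.length := by
      unfold Pre_LICS at hpre
      exact_mod_cast hpre
    simp only [LICS, LICS_alt]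
    have hc0 : (PySem.List.pyRange 0 (2 * (m : Int)) 1).map (fun _ => (0 : Int))
        = List.replicate (2 * m) (0 : Int) := by
      have he : (2 * (m : Int) - 0).toNat = 2 * m := by omega
      rw [List.map_const', PySem.List.length_pyRange_one, he]
    rw [hc0]
    have halen : (arr.take m).length = m := by simp [List.length_take]; omega
    have hc1 : (PySem.List.pyRange 0 (m : Int) 1).foldl
        (fun c i => PySem.List.pySetD c i (PySem.List.pyGetD arr i 0))
        (List.replicate (2 * m) (0 : Int))
        = arr.take m ++ List.replicate m (0 : Int) := by
      have hf := fill (fun i => PySem.List.pyGetD arr i 0) 0 m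
        (List.replicate (2 * m) 0) (by simp; omega)
      simp only [Nat.cast_zero, zero_add, Nat.zero_add, List.take_zero,
        List.nil_append] at hf
      rw [hf, List.drop_replicate]
      congr 1
      · simp only [PySem.List.pyGetD_natCast]
        exact mapRange_getD_take arr m hmlen
      · congr 1
        omega
    rw [hc1]
    have hc2 : (PySem.List.pyRange (m : Int) (2 * (m : Int)) 1).foldl
        (fun c i => PySem.List.pySetD c i (PySem.List.pyGetD arr (i - (m : Int)) 0))
        (arr.take m ++ List.replicate m (0 : Int))
        = arr.take m ++ arr.take m := by
      have hb2 : (2 * (m : Int)) = ((m : Int) + (m : Int)) := by ring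
      rw [hb2, fill (fun i => PySem.List.pyGetD arr (i - (m : Int)) 0) m m
        (arr.take m ++ List.replicate m 0) (by simp [halen])]
      have ht : (arr.take m ++ List.replicate m (0 : Int)).take m = arr.take m := by
        rw [List.take_append, halen, Nat.sub_self]
        simp [List.take_take]
      have hd : (arr.take m ++ List.replicate m (0 : Int)).drop (m + m) = [] := by
        rw [List.drop_eq_nil_iff]
        simp [halen]
      rw [ht, hd, List.append_nil]
      congr 1
      have harg : ∀ t : Nat, ((m : Int) + (t : Int) - (m : Int)) = ((t : Nat) : Int) := by
        intro t; ring
      simp only [harg, PySem.List.pyGetD_natCast]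
      exact mapRange_getD_take arr m hmlen
    rw [hc2]
    rw [PySem.List.slice_to arr (by positivity : (0 : Int) ≤ (m : Int))]
    simp only [Int.toNat_natCast]
    apply PySem.List.foldl_congr_mem
    intro acc i hi
    obtain ⟨hi0, him⟩ := PySem.List.mem_pyRange_one.mp hi
    obtain ⟨u, rfl⟩ : ∃ u : Nat, i = (u : Int) := ⟨i.toNat, by omega⟩
    have hum : u < m := by exact_mod_cast him
    have h1 := computeLIS_eq (arr.take m ++ arr.take m) u m (m : Int) hm
      (by simp [halen]; omega)
    rw [h1, rotate_window (arr.take m) u m (by omega) halen]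
    rw [window_eq _ (List.ne_nil_of_length_pos (by simp [halen]; omega))]
    rw [PySem.List.slice_from (arr.take m) (Int.natCast_nonneg u),
      PySem.List.slice_to (arr.take m) (Int.natCast_nonneg u)]
    simp only [Int.toNat_natCast]
    exact max_comm _ _
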